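-- pv_equiv track=rewrite | github.com/AOoligei/codegrip | scripts/prepare_beetlebox_java.py | tokenize_path
-- ===== SOURCE A (Python) =====
-- def tokenize_path(path: str) -> list[str]:
--     """Tokenize a file path into searchable tokens.
--
--     'src/main/java/org/apache/dubbo/rpc/TriRpcStatus.java'
--     -> ['src', 'main', 'java', 'org', 'apache', 'dubbo', 'rpc', 'tri', 'rpc', 'status']
--     """
--     # Split on / and .
--     parts = path.replace("/", " ").replace(".", " ").replace("_", " ").replace("-", " ")
--     # CamelCase split
--     tokens = []
--     for part in parts.split():
--         # Split CamelCase: 'TriRpcStatus' -> ['Tri', 'Rpc', 'Status']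
--         camel_tokens = []
--         current = ""
--         for c in part:
--             if c.isupper() and current:
--                 camel_tokens.append(current)
--                 current = c
--             else:
--                 current += c
--         if current:
--             camel_tokens.append(current)
--         tokens.extend(camel_tokens)
--
--     return [t.lower() for t in tokens if len(t) > 1]
-- ===== SOURCE B (Python) =====
-- def _flush(out, cur):
--     # append the finished token (lowercased) if it is long enough
--     if len(cur) > 1:
--         out.append(cur.lower())
--     return out
--
--
-- def tokenize_path(path: str) -> list[str]:
--     """Single pass over the characters: separators and interior capitals both
--     flush the current token, so no replace/split/camel phases are needed."""
--     seps = " \t\n\r/._-"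
--     out = []
--     cur = ""
--     for c in path:
--         if c in seps:
--             _flush(out, cur)
--             cur = ""
--         elif c.isupper():
--             _flush(out, cur)
--             cur = c
--         else:
--             cur += c
--     _flush(out, cur)
--     return out
-- ===== Notes on version B (the rewrite author's own statement) =====
-- stated objective: simpler
-- what changed: A's four replace passes, a whitespace split, and a per-word camelCase fold are fused into one single pass over the characters that flushes the current token at separators and interior capitals; filtering and lowercasing happen at flush time instead of in a final comprehension.
import Mathlib
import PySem

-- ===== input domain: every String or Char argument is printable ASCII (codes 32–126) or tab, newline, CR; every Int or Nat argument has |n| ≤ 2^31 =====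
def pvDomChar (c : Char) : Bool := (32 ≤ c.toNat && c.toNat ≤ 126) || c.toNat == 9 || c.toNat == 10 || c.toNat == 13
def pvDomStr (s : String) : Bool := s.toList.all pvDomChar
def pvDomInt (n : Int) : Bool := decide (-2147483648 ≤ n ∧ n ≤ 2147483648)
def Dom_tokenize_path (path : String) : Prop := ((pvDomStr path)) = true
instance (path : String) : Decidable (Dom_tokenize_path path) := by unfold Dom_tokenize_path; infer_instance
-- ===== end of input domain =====

-- B replaces A's replace/split/camel-split phases by one character scan that flushes
-- the current token at separators and interior capitals (objective: simpler, one pass).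

-- ===== PORT A =====
-- literal transliteration of A: four replaces, whitespace split, per-part camel fold,
-- then the final filter-and-lower comprehension (strings handled on the List Char side).
def tokenize_path (path : String) : List String :=
  let parts : List Char :=
    PySem.Chars.replace (PySem.Chars.replace (PySem.Chars.replace
      (PySem.Chars.replace path.toList ['/'] [' ']) ['.'] [' ']) ['_'] [' ']) ['-'] [' ']
  let tokens : List (List Char) :=
    (PySem.Chars.split₀ parts).foldl (fun tokens part =>
      let st := part.foldl
        (fun (st : List (List Char) × List Char) c =>
          if PySem.Chars.isupper c && !st.2.isEmpty then (st.1 ++ [st.2], [c])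
          else (st.1, st.2 ++ [c])) ([], [])
      let camel := if st.2.isEmpty then st.1 else st.1 ++ [st.2]
      tokens ++ camel) []
  (tokens.filter (fun t => 1 < t.length)).map (fun t => String.ofList (PySem.Chars.lower t))

-- ===== PORT B =====
-- helper of Source B: append the finished token (lowercased) if it is long enough
def pvFlush (out : List String) (cur : List Char) : List String :=
  if 1 < cur.length then out ++ [String.ofList (PySem.Chars.lower cur)] else out

def tokenize_path_alt (path : String) : List String :=
  let seps : List Char := [' ', '\t', '\n', '\r', '/', '.', '_', '-']
  let st := path.toList.foldl
    (fun (st : List String × List Char) c =>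
      if c ∈ seps then (pvFlush st.1 st.2, [])
      else if PySem.Chars.isupper c then (pvFlush st.1 st.2, [c])
      else (st.1, st.2 ++ [c])) ([], [])
  pvFlush st.1 st.2

-- ===== PRECONDITION & SPEC =====
def Spec_tokenize_path (path : String) (out : List String) : Prop := out = tokenize_path_alt path
instance (path : String) (out : List String) : Decidable (Spec_tokenize_path path out) := by unfold Spec_tokenize_path; infer_instance

-- ===== CLAIM (what is proved, stated in full; the proofs are below) =====
def Claim_equal_tokenize_path : Prop := ∀ (path : String), Dom_tokenize_path path → Spec_tokenize_path path (tokenize_path path)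

-- ===== LEMMAS AND PROOFS =====

-- the substitution performed by A's four replaces
def pvSigma (c : Char) : Char := if c = '/' ∨ c = '.' ∨ c = '_' ∨ c = '-' then ' ' else c

-- single-character replace is a map
theorem pv_replace_go_single (a b : Char) :
    ∀ (l : List Char) (fuel : Nat) (acc : List Char), l.length ≤ fuel →
      PySem.Chars.replace.go [a] [b] fuel l acc
        = acc.reverse ++ l.map (fun c => if c = a then b else c) := by
  intro l
  induction l with
  | nil => intro fuel acc _; cases fuel <;> simp [PySem.Chars.replace.go]
  | cons c t ih =>
      intro fuel acc h
      cases fuel with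
      | zero => simp at h
      | succ n =>
          simp only [PySem.Chars.replace.go]
          by_cases hc : c = a
          · subst hc
            have hp : List.isPrefixOf [c] (c :: t) = true := by simp [List.isPrefixOf]
            simp only [hp, if_true, List.length_cons, List.length_nil, Nat.zero_add,
              List.drop_succ_cons, List.drop_zero, List.reverse_cons, List.reverse_nil,
              List.nil_append]
            rw [ih n ([b] ++ acc) (by simp at h; omega)]
            simp
          · have hp : List.isPrefixOf [a] (c :: t) = false := by
              simp [List.isPrefixOf]; exact fun h' => absurd h'.symm hc
            simp only [hp, Bool.false_eq_true, ite_false]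
            rw [ih n (c :: acc) (by simpa using h)]
            simp [hc]

theorem pv_replace_single (s : List Char) (a b : Char) :
    PySem.Chars.replace s [a] [b] = s.map (fun c => if c = a then b else c) := by
  simpa using pv_replace_go_single a b s s.length [] (le_refl _)

-- A's separator predicate (what B tests with `c ∈ seps`)
def pvIsSep (c : Char) : Bool := c ∈ ([' ', '\t', '\n', '\r', '/', '.', '_', '-'] : List Char)

-- on the ASCII domain, isspace after pvSigma is exactly membership in B's separator list
theorem pv_toNat_inj (a b : Char) (h : a.toNat = b.toNat) : a = b :=
  Char.ext (UInt32.toNat_inj.mp h)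

theorem pv_sep_char (c : Char) (h : pvDomChar c = true) :
    PySem.Chars.isspace (pvSigma c) = pvIsSep c := by
  have hinj : ∀ d : Char, (c = d) ↔ (c.toNat = d.toNat) :=
    fun d => ⟨fun h' => h' ▸ rfl, pv_toNat_inj c d⟩
  by_cases hp : c = '/' ∨ c = '.' ∨ c = '_' ∨ c = '-'
  · have hσ : pvSigma c = ' ' := by simp [pvSigma, hp]
    have hm : pvIsSep c = true := by
      rcases hp with h1 | h1 | h1 | h1 <;> subst h1 <;> decide
    rw [hσ, hm]; decide
  · have hσ : pvSigma c = c := by simp [pvSigma, hp]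
    rw [hσ]
    simp only [pvDomChar, Bool.or_eq_true, Bool.and_eq_true, beq_iff_eq,
      decide_eq_true_eq] at h
    rw [not_or, not_or, not_or] at hp
    obtain ⟨hp1, hp2, hp3, hp4⟩ := hp
    rw [hinj] at hp1 hp2 hp3 hp4
    simp only [PySem.Chars.isspace, pvIsSep, List.mem_cons, List.not_mem_nil, or_false, hinj]
    rw [Bool.eq_iff_iff]
    simp only [Bool.or_eq_true, Bool.and_eq_true, decide_eq_true_eq]
    have e1 : ('/' : Char).toNat = 47 := rfl
    have e2 : ('.' : Char).toNat = 46 := rfl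
    have e3 : ('_' : Char).toNat = 95 := rfl
    have e4 : ('-' : Char).toNat = 45 := rfl
    have e5 : (' ' : Char).toNat = 32 := rfl
    have e6 : ('\t' : Char).toNat = 9 := rfl
    have e7 : ('\n' : Char).toNat = 10 := rfl
    have e8 : ('\x0d' : Char).toNat = 13 := rfl
    rw [e1] at hp1; rw [e2] at hp2; rw [e3] at hp3; rw [e4] at hp4
    simp only [e1, e2, e3, e4, e5, e6, e7, e8]
    omega

-- words of a string, accumulated left to right (split₀, un-reversed)
def pvSplitW : List Char → List Char → List (List Char)
  | [], cur => if cur.isEmpty then [] else [cur]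
  | c :: cs, cur =>
      if PySem.Chars.isspace c then
        (if cur.isEmpty then [] else [cur]) ++ pvSplitW cs []
      else pvSplitW cs (cur ++ [c])

theorem pv_split₀_go (l : List Char) : ∀ (cur : List Char) (acc : List (List Char)),
    PySem.Chars.split₀.go l cur acc = acc.reverse ++ pvSplitW l cur.reverse := by
  induction l with
  | nil =>
      intro cur acc
      by_cases hc : cur.isEmpty <;> simp [PySem.Chars.split₀.go, pvSplitW, hc]
  | cons c cs ih =>
      intro cur acc
      simp only [PySem.Chars.split₀.go, pvSplitW]
      by_cases hs : PySem.Chars.isspace c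
      · by_cases hc : cur.isEmpty <;> simp_all
      · simp [hs, ih]

theorem pv_split₀ (s : List Char) : PySem.Chars.split₀ s = pvSplitW s [] := by
  simpa using pv_split₀_go s [] []

-- A's camel step / finish
def pvStepA (st : List (List Char) × List Char) (c : Char) : List (List Char) × List Char :=
  if PySem.Chars.isupper c && !st.2.isEmpty then (st.1 ++ [st.2], [c]) else (st.1, st.2 ++ [c])

def pvFinish (st : List (List Char) × List Char) : List (List Char) :=
  if st.2.isEmpty then st.1 else st.1 ++ [st.2]

def pvCamelW (w : List Char) : List (List Char) := pvFinish (w.foldl pvStepA ([], []))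

-- camel tokens of the remaining input, word boundaries included (fused A)
def pvCamS : List Char → List Char → List (List Char)
  | [], cur => if cur.isEmpty then [] else [cur]
  | c :: cs, cur =>
      if PySem.Chars.isspace c then
        (if cur.isEmpty then [] else [cur]) ++ pvCamS cs []
      else if PySem.Chars.isupper c && !cur.isEmpty then cur :: pvCamS cs [c]
      else pvCamS cs (cur ++ [c])

theorem pv_stepA_snd_ne (w : List Char) : ∀ (st : List (List Char) × List Char),
    st.2 ≠ [] → (w.foldl pvStepA st).2 ≠ [] := by
  induction w with
  | nil => intro st h; simpa using h
  | cons c cs ih =>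
      intro st h
      simp only [List.foldl_cons]
      apply ih
      unfold pvStepA
      split <;> simp

theorem pv_camelF_empty_iff (w : List Char) :
    (w = [] → w.foldl pvStepA ([], []) = ([], [])) ∧ (w ≠ [] → (w.foldl pvStepA ([], [])).2 ≠ []) := by
  constructor
  · intro h; subst h; rfl
  · intro h
    cases w with
    | nil => exact absurd rfl h
    | cons c cs =>
        simp only [List.foldl_cons]
        apply pv_stepA_snd_ne
        unfold pvStepA
        split <;> simp

-- fusing split₀ with the per-word camel split
theorem pv_fuse (q : List Char) : ∀ (w : List Char),
    (pvSplitW q w).flatMap pvCamelW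
      = (w.foldl pvStepA ([], [])).1 ++ pvCamS q (w.foldl pvStepA ([], [])).2 := by
  induction q with
  | nil =>
      intro w
      by_cases hw : w = []
      · subst hw; simp [pvSplitW, pvCamS]
      · have h2 := (pv_camelF_empty_iff w).2 hw
        simp only [pvSplitW, pvCamS, List.isEmpty_iff, if_neg hw, if_neg h2]
        simp [pvCamelW, pvFinish, List.isEmpty_iff, h2]
  | cons c cs ih =>
      intro w
      by_cases hs : PySem.Chars.isspace c
      · simp only [pvSplitW, pvCamS, hs, if_pos, List.isEmpty_iff]
        by_cases hw : w = []
        · subst hw; simpa using ih []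
        · have h2 := (pv_camelF_empty_iff w).2 hw
          simp only [if_neg hw, if_neg h2]
          rw [List.flatMap_append]
          simp only [List.flatMap_cons, List.flatMap_nil, List.append_nil]
          rw [ih []]
          simp [pvCamelW, pvFinish, List.isEmpty_iff, h2, List.append_assoc]
      · simp only [pvSplitW, pvCamS, hs, Bool.false_eq_true, if_false]
        rw [ih (w ++ [c])]
        rw [List.foldl_append]
        simp only [List.foldl_cons, List.foldl_nil]
        by_cases hu : PySem.Chars.isupper c && !(w.foldl pvStepA ([], [])).2.isEmpty
        · rw [show pvStepA (w.foldl pvStepA ([], [])) c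
              = ((w.foldl pvStepA ([], [])).1 ++ [(w.foldl pvStepA ([], [])).2], [c]) from by
              simp [pvStepA, hu]]
          rw [if_pos hu]
          simp
        · rw [show pvStepA (w.foldl pvStepA ([], [])) c
              = ((w.foldl pvStepA ([], [])).1, (w.foldl pvStepA ([], [])).2 ++ [c]) from by
              simp only [pvStepA, eq_false hu, if_false]]
          rw [if_neg hu]

-- mapping the final filter/lower over the fused token stream equals B's scan
def pvRunB : List Char → List Char → List String
  | [], cur => pvFlush [] cur
  | c :: cs, cur =>
      if pvIsSep c then pvFlush [] cur ++ pvRunB cs []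
      else if PySem.Chars.isupper c then pvFlush [] cur ++ pvRunB cs [c]
      else pvRunB cs (cur ++ [c])

theorem pv_emit_one (cur : List Char) :
    ((if cur.isEmpty then ([] : List (List Char)) else [cur]).filter (fun t => 1 < t.length)).map
        (fun t => String.ofList (PySem.Chars.lower t)) = pvFlush [] cur := by
  by_cases hc : cur.isEmpty <;>
    simp only [hc, if_pos, List.filter_nil, List.map_nil, pvFlush] <;>
    by_cases hl : 1 < cur.length <;>
    simp_all [List.filter, List.isEmpty_iff]

theorem pv_filter_map_camS (p : List Char) (hdom : p.all pvDomChar = true) : ∀ (cur : List Char),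
    ((pvCamS (p.map pvSigma) cur).filter (fun t => 1 < t.length)).map
        (fun t => String.ofList (PySem.Chars.lower t)) = pvRunB p cur := by
  induction p with
  | nil => intro cur; simpa [pvCamS, pvRunB] using pv_emit_one cur
  | cons c cs ih =>
      simp only [List.all_cons, Bool.and_eq_true] at hdom
      intro cur
      have hsep := pv_sep_char c hdom.1
      simp only [List.map_cons, pvCamS, pvRunB]
      by_cases hs : pvIsSep c
      · rw [if_pos (hsep.trans hs), if_pos hs]
        rw [List.filter_append, List.map_append, ih hdom.2 []]
        rw [pv_emit_one]
      · rw [if_neg (by rw [hsep]; exact hs), if_neg hs]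
        by_cases hu : PySem.Chars.isupper (pvSigma c)
        · have hsc : pvSigma c = c := by
            unfold pvSigma at hu ⊢
            split at hu
            · exact absurd hu (by decide)
            · simp_all [pvSigma]
          rw [hsc] at hu
          simp only [hsc, hu, if_pos, Bool.true_and]
          by_cases hc : cur.isEmpty
          · have : cur = [] := by simpa [List.isEmpty_iff] using hc
            subst this
            simp only [List.isEmpty_nil, Bool.not_true, Bool.false_eq_true,
              if_false, List.nil_append]
            rw [ih hdom.2 [c]]
            simp [pvFlush]
          · simp only [hc, Bool.not_false, if_pos]
            rw [List.filter_cons]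
            by_cases hl : 1 < cur.length
            · rw [if_pos (by simpa using hl), List.map_cons, ih hdom.2 [c]]
              simp [pvFlush, hl]
            · rw [if_neg (by simpa using hl), ih hdom.2 [c]]
              simp [pvFlush, hl]
        · have hsc : pvSigma c = c := by
            unfold pvSigma
            rw [if_neg]
            intro h1
            apply hs
            unfold pvIsSep
            rcases h1 with h | h | h | h <;> subst h <;> decide
          rw [hsc] at hu
          simp only [hsc, hu, Bool.false_and, Bool.false_eq_true]
          exact ih hdom.2 (cur ++ [c])

-- B's fold equals pvRunB
def pvStepB (st : List String × List Char) (c : Char) : List String × List Char :=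
  if c ∈ ([' ', '\t', '\n', '\r', '/', '.', '_', '-'] : List Char) then (pvFlush st.1 st.2, [])
  else if PySem.Chars.isupper c then (pvFlush st.1 st.2, [c])
  else (st.1, st.2 ++ [c])

theorem pv_foldB (p : List Char) : ∀ (out : List String) (cur : List Char),
    pvFlush (p.foldl pvStepB (out, cur)).1 (p.foldl pvStepB (out, cur)).2
      = out ++ pvRunB p cur := by
  induction p with
  | nil => intro out cur; simp only [List.foldl_nil, pvRunB, pvFlush]; split <;> simp
  | cons c cs ih =>
      intro out cur
      simp only [List.foldl_cons, pvRunB]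
      by_cases hs : pvIsSep c
      · rw [show pvStepB (out, cur) c = (pvFlush out cur, []) from by
            simp [pvStepB, show (c ∈ ([' ', '\t', '\n', '\r', '/', '.', '_', '-'] : List Char)) from by simpa [pvIsSep] using hs]]
        rw [if_pos hs, ih (pvFlush out cur) []]
        simp [pvFlush]; split <;> simp
      · rw [if_neg hs]
        by_cases hu : PySem.Chars.isupper c
        · rw [show pvStepB (out, cur) c = (pvFlush out cur, [c]) from by
              simp [pvStepB, hu, show ¬(c ∈ ([' ', '\t', '\n', '\r', '/', '.', '_', '-'] : List Char)) from by simpa [pvIsSep] using hs]]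
          rw [ih (pvFlush out cur) [c]]
          simp only [hu, if_pos]
          simp [pvFlush]; split <;> simp
        · rw [show pvStepB (out, cur) c = (out, cur ++ [c]) from by
              simp [pvStepB, hu, show ¬(c ∈ ([' ', '\t', '\n', '\r', '/', '.', '_', '-'] : List Char)) from by simpa [pvIsSep] using hs]]
          simp only [hu, Bool.false_eq_true, if_false]
          exact ih out (cur ++ [c])

-- pointwise: the four single-character replaces compose to pvSigma
theorem pv_sigma_comp :
    ((fun c => if c = '-' then ' ' else c) ∘ (fun c => if c = '_' then ' ' else c) ∘
      (fun c => if c = '.' then ' ' else c) ∘ fun c => if c = '/' then ' ' else c) = pvSigma := by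
  funext c
  simp only [Function.comp_apply]
  by_cases h1 : c = '/'
  · subst h1; decide
  · by_cases h2 : c = '.'
    · subst h2; decide
    · by_cases h3 : c = '_'
      · subst h3; decide
      · by_cases h4 : c = '-'
        · subst h4; decide
        · simp [pvSigma, h1, h2, h3, h4]

-- ===== VERDICT (by name: the statement is the Claim_ definition above) =====
theorem tokenize_path_spec : Claim_equal_tokenize_path := by
  intro path hdom
  have hd : path.toList.all pvDomChar = true := hdom
  show tokenize_path path = tokenize_path_alt path
  have h1 : tokenize_path path
      = (((pvSplitW (path.toList.map pvSigma) []).flatMap pvCamelW).filter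
          (fun t => decide (1 < t.length))).map (fun t => String.ofList (PySem.Chars.lower t)) := by
    unfold tokenize_path
    simp only [pv_replace_single, List.map_map, pv_sigma_comp, pv_split₀]
    congr 1
    congr 1
    exact (PySem.List.foldl_append_eq_flatMap pvCamelW _ []).trans (List.nil_append _)
  have h2 : tokenize_path_alt path = pvRunB path.toList [] := by
    unfold tokenize_path_alt
    exact (pv_foldB path.toList [] []).trans (List.nil_append _)
  rw [h1, h2, pv_fuse (path.toList.map pvSigma) []]
  simp only [List.foldl_nil, List.nil_append]
  exact pv_filter_map_camS path.toList hd []
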